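-- pv_equiv track=rewrite | github.com/janezaletskaya/algorithms | algorithm_training_2025/week1/H.py | solution
-- ===== SOURCE A (Python) =====
-- def solution(str_orders):
--     odd_len_orders = []
--     even_len_orders = []
--
--     for order in str_orders:
--         odd = 0
--         even = 0
--         for i in range(0, len(order), 2):
--             if order[i] == 'S':
--                 even += 1
--
--         for i in range(1, len(order), 2):
--             if order[i] == 'S':
--                 odd += 1
--
--         length = len(order)
--         order_data = (odd, even, odd - even, length)
--
--         if length % 2 == 1:
--             odd_len_orders.append(order_data)
--         else:
--             even_len_orders.append(order_data)
--
--     best_cnt = 0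
--
--     if len(odd_len_orders) == 0:
--         best_cnt = sum(order[1] for order in even_len_orders)
--         return best_cnt
--
--     odd_len_orders.sort(key=lambda order: abs(order[2]), reverse=True)
--
--     slots_even = len(odd_len_orders) // 2 + len(odd_len_orders) % 2
--     slots_odd = len(odd_len_orders) // 2
--
--     for order in odd_len_orders:
--         if order[2] < 0 and slots_even > 0:
--             best_cnt += order[1]
--             slots_even -= 1
--         elif order[2] > 0 and slots_odd > 0:
--             best_cnt += order[0]
--             slots_odd -= 1
--         else:
--             if slots_even > 0:
--                 best_cnt += order[1]
--                 slots_even -= 1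
--             else:
--                 best_cnt += order[0]
--                 slots_odd -= 1
--
--     best_cnt += sum(max(order[1], order[0]) for order in even_len_orders)
--
--     return best_cnt
-- ===== SOURCE B (Python) =====
-- def solution(str_orders):
--     odd_diffs = []
--     odd_base = 0
--     even_even = 0
--     even_best = 0
--     for order in str_orders:
--         e = sum(1 for i, c in enumerate(order) if i % 2 == 0 and c == 'S')
--         o = sum(1 for i, c in enumerate(order) if i % 2 == 1 and c == 'S')
--         if len(order) % 2 == 1:
--             odd_diffs.append(o - e)
--             odd_base += e
--         else:
--             even_even += e
--             even_best += max(e, o)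
--     if not odd_diffs:
--         return even_even
--     k = len(odd_diffs) // 2
--     return odd_base + sum(sorted(odd_diffs, reverse=True)[:k]) + even_best
-- ===== Notes on version B (the rewrite author's own statement) =====
-- stated objective: alternative
-- what changed: B replaces A's abs-sorted two-counter slot-assignment greedy over odd-length orders by a closed form (baseline sum of even-index counts plus the sum of the floor(n/2) largest diffs, via one reverse sort and a prefix sum), counts 'S' per order with a single enumerate pass instead of two stepped index loops, and keeps running sums instead of materialising tuple lists for even-length orders.
import Mathlib
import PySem

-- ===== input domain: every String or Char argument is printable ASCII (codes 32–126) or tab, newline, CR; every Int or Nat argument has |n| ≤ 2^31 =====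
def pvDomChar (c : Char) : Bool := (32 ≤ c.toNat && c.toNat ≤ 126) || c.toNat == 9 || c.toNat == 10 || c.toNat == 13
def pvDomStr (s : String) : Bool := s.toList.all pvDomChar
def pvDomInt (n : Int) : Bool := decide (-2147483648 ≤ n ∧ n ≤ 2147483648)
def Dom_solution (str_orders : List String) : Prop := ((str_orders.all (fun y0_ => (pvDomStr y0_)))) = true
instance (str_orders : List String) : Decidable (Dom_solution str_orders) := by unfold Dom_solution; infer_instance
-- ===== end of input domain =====

-- B replaces A's abs-sorted slot-assignment greedy by a closed form (baseline + sum of the floor(n/2)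
-- largest diffs) and counts 'S' by one enumerate pass; same asymptotic cost (objective: alternative).

-- ===== PORT A =====
-- `for i in range(0, len(order), 2): if order[i] == 'S': even += 1`  (and the odd twin)
def aCountE (cs : List Char) : Int :=
  (PySem.List.pyRange 0 (cs.length : Int) 2).foldl
    (fun e i => if PySem.List.pyGetD cs i ' ' = 'S' then e + 1 else e) 0

def aCountO (cs : List Char) : Int :=
  (PySem.List.pyRange 1 (cs.length : Int) 2).foldl
    (fun o i => if PySem.List.pyGetD cs i ' ' = 'S' then o + 1 else o) 0

-- body of the first `for order in str_orders` loop
def aStep (acc : List (Int × Int × Int × Int) × List (Int × Int × Int × Int)) (order : String) :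
    List (Int × Int × Int × Int) × List (Int × Int × Int × Int) :=
  let cs := order.toList
  let even := aCountE cs
  let odd := aCountO cs
  let length : Int := (cs.length : Int)
  let data := (odd, even, odd - even, length)
  if PySem.Int.mod length 2 = 1 then (acc.1 ++ [data], acc.2) else (acc.1, acc.2 ++ [data])

-- body of the slot-assignment loop; state = (best_cnt, slots_even, slots_odd)
def aSlotStep (st : Int × Int × Int) (o : Int × Int × Int × Int) : Int × Int × Int :=
  if o.2.2.1 < 0 ∧ 0 < st.2.1 then (st.1 + o.2.1, st.2.1 - 1, st.2.2)
  else if 0 < o.2.2.1 ∧ 0 < st.2.2 then (st.1 + o.1, st.2.1, st.2.2 - 1)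
  else if 0 < st.2.1 then (st.1 + o.2.1, st.2.1 - 1, st.2.2)
  else (st.1 + o.1, st.2.1, st.2.2 - 1)

def solution (str_orders : List String) : Int :=
  let lists := str_orders.foldl aStep ([], [])
  let oddL := lists.1
  let evenL := lists.2
  if oddL.length = 0 then
    (evenL.map (fun o => o.2.1)).sum
  else
    let sortedOdd := PySem.List.sorted oddL (fun o => |o.2.2.1|) true
    let slotsE : Int :=
      PySem.Int.floordiv (oddL.length : Int) 2 + PySem.Int.mod (oddL.length : Int) 2
    let slotsO : Int := PySem.Int.floordiv (oddL.length : Int) 2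
    let st := sortedOdd.foldl aSlotStep (0, slotsE, slotsO)
    st.1 + (evenL.map (fun o => max o.2.1 o.1)).sum

-- ===== PORT B =====
-- `sum(1 for i, c in enumerate(order) if i % 2 == 0 and c == 'S')`  (and the odd twin)
def bCountE (cs : List Char) : Int :=
  ((PySem.List.enumerate cs).countP
    (fun p => decide (PySem.Int.mod p.1 2 = 0) && decide (p.2 = 'S')) : Nat)

def bCountO (cs : List Char) : Int :=
  ((PySem.List.enumerate cs).countP
    (fun p => decide (PySem.Int.mod p.1 2 = 1) && decide (p.2 = 'S')) : Nat)

-- body of B's single loop; state = (odd_diffs, odd_base, even_even, even_best)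
def bStep (st : List Int × Int × Int × Int) (order : String) : List Int × Int × Int × Int :=
  let cs := order.toList
  let e := bCountE cs
  let o := bCountO cs
  if PySem.Int.mod (cs.length : Int) 2 = 1 then (st.1 ++ [o - e], st.2.1 + e, st.2.2)
  else (st.1, st.2.1, st.2.2.1 + e, st.2.2.2 + max e o)

def solution_alt (str_orders : List String) : Int :=
  let st := str_orders.foldl bStep ([], 0, 0, 0)
  if st.1 = [] then st.2.2.1
  else
    let k : Int := PySem.Int.floordiv (st.1.length : Int) 2
    st.2.1 + (PySem.List.slice (PySem.List.sorted st.1 (fun x => x) true) none (some k)).sum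
      + st.2.2.2

-- ===== PRECONDITION & SPEC =====
def Spec_solution (str_orders : List String) (out : Int) : Prop := out = solution_alt str_orders
instance (str_orders : List String) (out : Int) : Decidable (Spec_solution str_orders out) := by unfold Spec_solution; infer_instance

-- ===== CLAIM (what is proved, stated in full; the proofs are below) =====
def Claim_equal_solution : Prop := ∀ (str_orders : List String), Dom_solution str_orders → Spec_solution str_orders (solution str_orders)

-- ===== LEMMAS AND PROOFS =====

-- count of 'S' at even (par = true) / odd (par = false) indices
def pvCnt (par : Bool) : List Char → Int
  | [] => 0
  | c :: t => if par then (if c = 'S' then 1 else 0) + pvCnt false t else pvCnt true t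

theorem pvTwoStep {α : Type} {motive : List α → Prop} (h0 : motive [])
    (h1 : ∀ a, motive [a]) (h2 : ∀ a b t, motive t → motive (a :: b :: t)) :
    ∀ l, motive l := by
  have key : ∀ n (l : List α), l.length ≤ n → motive l := by
    intro n
    induction n with
    | zero =>
      intro l hl
      obtain rfl : l = [] := List.length_eq_zero_iff.mp (by omega)
      exact h0
    | succ n ih =>
      intro l hl
      rcases l with _ | ⟨a, _ | ⟨b, t⟩⟩
      · exact h0
      · exact h1 a
      · exact h2 a b t (ih t (by simp at hl; omega))
  intro l; exact key l.length l le_rfl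

theorem fold_even : ∀ (cs : List Char), ∀ acc : Int,
    (List.range ((cs.length + 1) / 2)).foldl
      (fun e (k : Nat) => if PySem.List.pyGetD cs (0 + 2 * (k : Int)) ' ' = 'S' then e + 1 else e)
      acc = acc + pvCnt true cs := by
  intro cs
  induction cs using pvTwoStep with
  | h0 => intro acc; simp [pvCnt]
  | h1 a =>
    intro acc
    have hg : PySem.List.pyGetD [a] (0 + 2 * ((0 : Nat) : Int)) ' ' = a := by
      norm_num [PySem.List.pyGetD_ofNat', List.getD]
    simp only [List.length_cons, List.length_nil]
    rw [List.range_one, List.foldl_cons, List.foldl_nil, hg]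
    by_cases hc : a = 'S' <;> simp [hc, pvCnt]
  | h2 a b t ih =>
    intro acc
    have hlen : ((a :: b :: t).length + 1) / 2 = (t.length + 1) / 2 + 1 := by
      simp only [List.length_cons]; omega
    have hg0 : PySem.List.pyGetD (a :: b :: t) (0 + 2 * ((0 : Nat) : Int)) ' ' = a := by
      norm_num [PySem.List.pyGetD_ofNat', List.getD]
    have hshift : ∀ k : Nat,
        PySem.List.pyGetD (a :: b :: t) (0 + 2 * ((k + 1 : Nat) : Int)) ' '
          = PySem.List.pyGetD t (0 + 2 * (k : Int)) ' ' := by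
      intro k
      have h1 : (0 + 2 * ((k + 1 : Nat) : Int)) = ((2 * k + 2 : Nat) : Int) := by push_cast; ring
      have h2 : (0 + 2 * ((k : Nat) : Int)) = ((2 * k : Nat) : Int) := by push_cast; ring
      rw [h1, h2, PySem.List.pyGetD_natCast, PySem.List.pyGetD_natCast,
        show 2 * k + 2 = (2 * k) + 1 + 1 from rfl, List.getD_cons_succ, List.getD_cons_succ]
    rw [hlen, List.range_succ_eq_map, List.foldl_cons, List.foldl_map]
    simp only [Nat.succ_eq_add_one, hshift, hg0]
    rw [ih]
    have hpv : pvCnt true (a :: b :: t) = (if a = 'S' then 1 else 0) + pvCnt true t := by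
      simp [pvCnt]
    rw [hpv]
    by_cases hc : a = 'S' <;> simp only [hc, if_true, if_false] <;> ring

theorem fold_odd : ∀ (cs : List Char), ∀ acc : Int,
    (List.range (cs.length / 2)).foldl
      (fun o (k : Nat) => if PySem.List.pyGetD cs (1 + 2 * (k : Int)) ' ' = 'S' then o + 1 else o)
      acc = acc + pvCnt false cs := by
  intro cs
  induction cs using pvTwoStep with
  | h0 => intro acc; simp [pvCnt]
  | h1 a => intro acc; simp [pvCnt]
  | h2 a b t ih =>
    intro acc
    have hlen : (a :: b :: t).length / 2 = t.length / 2 + 1 := by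
      simp only [List.length_cons]; omega
    have hg0 : PySem.List.pyGetD (a :: b :: t) (1 + 2 * ((0 : Nat) : Int)) ' ' = b := by
      norm_num [PySem.List.pyGetD_ofNat', List.getD]
    have hshift : ∀ k : Nat,
        PySem.List.pyGetD (a :: b :: t) (1 + 2 * ((k + 1 : Nat) : Int)) ' '
          = PySem.List.pyGetD t (1 + 2 * (k : Int)) ' ' := by
      intro k
      have h1 : (1 + 2 * ((k + 1 : Nat) : Int)) = ((2 * k + 3 : Nat) : Int) := by push_cast; ring
      have h2 : (1 + 2 * ((k : Nat) : Int)) = ((2 * k + 1 : Nat) : Int) := by push_cast; ring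
      rw [h1, h2, PySem.List.pyGetD_natCast, PySem.List.pyGetD_natCast,
        show 2 * k + 3 = (2 * k + 1) + 1 + 1 from rfl, List.getD_cons_succ, List.getD_cons_succ]
    rw [hlen, List.range_succ_eq_map, List.foldl_cons, List.foldl_map]
    simp only [Nat.succ_eq_add_one, hshift, hg0]
    rw [ih]
    have hpv : pvCnt false (a :: b :: t) = (if b = 'S' then 1 else 0) + pvCnt false t := by
      simp [pvCnt]
    rw [hpv]
    by_cases hc : b = 'S' <;> simp only [hc, if_true, if_false] <;> ring

theorem aCountE_eq (cs : List Char) : aCountE cs = pvCnt true cs := by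
  rw [aCountE, PySem.List.pyRange_of_pos 0 _ (by norm_num),
    show (if (0 : Int) < (cs.length : Int)
        then (((cs.length : Int) - 0 + 2 - 1) / 2).toNat else 0) = (cs.length + 1) / 2 from by
      split <;> omega,
    List.foldl_map, fold_even cs 0]
  ring

theorem aCountO_eq (cs : List Char) : aCountO cs = pvCnt false cs := by
  rw [aCountO, PySem.List.pyRange_of_pos 1 _ (by norm_num),
    show (if (1 : Int) < (cs.length : Int)
        then (((cs.length : Int) - 1 + 2 - 1) / 2).toNat else 0) = cs.length / 2 from by
      split <;> omega,
    List.foldl_map, fold_odd cs 0]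
  ring

theorem b_cnt_even : ∀ (cs : List Char) (s : Int),
    ((PySem.List.enumerate cs s).countP
       (fun p => decide (PySem.Int.mod p.1 2 = 0) && decide (p.2 = 'S')) : Int)
      = if s % 2 = 0 then pvCnt true cs else pvCnt false cs := by
  intro cs
  induction cs with
  | nil => intro s; simp [PySem.List.enumerate_nil, pvCnt]
  | cons c t ih =>
    intro s
    rw [PySem.List.enumerate_cons, List.countP_cons]
    push_cast
    rw [ih (s + 1)]
    simp only [PySem.Int.mod_eq_emod_of_pos (by norm_num : (0 : Int) < 2)]
    rcases Int.emod_two_eq_zero_or_one s with hs | hs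
    · have h1 : ¬((s + 1) % 2 = 0) := by omega
      by_cases hc : c = 'S'
      · simp [hs, h1, hc, pvCnt, add_comm]
      · simp [hs, h1, hc, pvCnt]
    · have h0 : (s + 1) % 2 = 0 := by omega
      have h2 : ¬(s % 2 = 0) := by omega
      by_cases hc : c = 'S'
      · simp [hs, h0, hc, pvCnt]
      · simp [hs, h0, hc, pvCnt]

theorem b_cnt_odd : ∀ (cs : List Char) (s : Int),
    ((PySem.List.enumerate cs s).countP
       (fun p => decide (PySem.Int.mod p.1 2 = 1) && decide (p.2 = 'S')) : Int)
      = if s % 2 = 0 then pvCnt false cs else pvCnt true cs := by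
  intro cs
  induction cs with
  | nil => intro s; simp [PySem.List.enumerate_nil, pvCnt]
  | cons c t ih =>
    intro s
    rw [PySem.List.enumerate_cons, List.countP_cons]
    push_cast
    rw [ih (s + 1)]
    simp only [PySem.Int.mod_eq_emod_of_pos (by norm_num : (0 : Int) < 2)]
    rcases Int.emod_two_eq_zero_or_one s with hs | hs
    · have h1 : ¬((s + 1) % 2 = 0) := by omega
      by_cases hc : c = 'S'
      · simp [hs, h1, hc, pvCnt]
      · simp [hs, h1, hc, pvCnt]
    · have h0 : (s + 1) % 2 = 0 := by omega
      have h2 : ¬(s % 2 = 0) := by omega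
      by_cases hc : c = 'S'
      · simp [hs, h0, hc, pvCnt, add_comm]
      · simp [hs, h0, hc, pvCnt]

theorem bCountE_eq (cs : List Char) : bCountE cs = pvCnt true cs := by
  have h := b_cnt_even cs 0
  rw [if_pos (by norm_num)] at h
  exact h

theorem bCountO_eq (cs : List Char) : bCountO cs = pvCnt false cs := by
  have h := b_cnt_odd cs 0
  rw [if_pos (by norm_num)] at h
  exact h

-- abbreviations used by the assembly
def pvE (s : String) : Int := pvCnt true s.toList
def pvO (s : String) : Int := pvCnt false s.toList
def pvData (s : String) : Int × Int × Int × Int :=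
  (pvO s, pvE s, pvO s - pvE s, (s.toList.length : Int))
def pvP (s : String) : Bool := decide (PySem.Int.mod ((s.toList.length : Int)) 2 = 1)

theorem a_fold (xs : List String) :
    ∀ a1 a2, xs.foldl aStep (a1, a2) =
      (a1 ++ (xs.filter pvP).map pvData, a2 ++ (xs.filter (fun s => !pvP s)).map pvData) := by
  induction xs with
  | nil => intro a1 a2; simp
  | cons x t ih =>
    intro a1 a2
    have hstep : aStep (a1, a2) x =
        if pvP x then (a1 ++ [pvData x], a2) else (a1, a2 ++ [pvData x]) := by
      simp only [aStep, aCountE_eq, aCountO_eq, pvData, pvP, pvE, pvO]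
      simp
    rw [List.foldl_cons, hstep]
    by_cases h : pvP x
    · rw [if_pos h, ih]
      simp [h, List.append_assoc]
    · rw [if_neg h, ih]
      simp only [Bool.not_eq_true] at h
      simp [h, List.append_assoc]

theorem b_fold (xs : List String) :
    ∀ l b e m, xs.foldl bStep (l, b, e, m) =
      (l ++ (xs.filter pvP).map (fun s => pvO s - pvE s),
       b + ((xs.filter pvP).map pvE).sum,
       e + ((xs.filter (fun s => !pvP s)).map pvE).sum,
       m + ((xs.filter (fun s => !pvP s)).map (fun s => max (pvE s) (pvO s))).sum) := by
  induction xs with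
  | nil => intro l b e m; simp
  | cons x t ih =>
    intro l b e m
    have hstep : bStep (l, b, e, m) x =
        if pvP x then (l ++ [pvO x - pvE x], b + pvE x, e, m)
        else (l, b, e + pvE x, m + max (pvE x) (pvO x)) := by
      simp only [bStep, bCountE_eq, bCountO_eq, pvP, pvE, pvO]
      simp
    rw [List.foldl_cons, hstep]
    by_cases h : pvP x
    · rw [if_pos h, ih]
      simp only [List.filter_cons, h, List.map_cons, List.sum_cons, if_true, Prod.mk.injEq]
      refine ⟨by simp [List.append_assoc], by ring, rfl, rfl⟩
    · rw [if_neg h, ih]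
      simp only [Bool.not_eq_true] at h
      simp only [List.filter_cons, h, Bool.not_false, List.map_cons, List.sum_cons,
        Bool.false_eq_true, if_true, if_false, Prod.mk.injEq]
      exact ⟨trivial, trivial, by ring, by ring⟩

-- sum of the k largest values
def pvTopk (k : Nat) (xs : List Int) : Int :=
  ((PySem.List.sorted xs (fun x => x) true).take k).sum

theorem sorted_cons_max {x : Int} {xs : List Int} (h : ∀ y ∈ xs, y ≤ x) :
    PySem.List.sorted (x :: xs) (fun v => v) true = x :: PySem.List.sorted xs (fun v => v) true := by
  apply List.Perm.eq_of_pairwise (le := fun a b : Int => b ≤ a)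
  · intro a b _ _ h1 h2; omega
  · exact PySem.List.sorted_pairwise_rev _ _
  · rw [List.pairwise_cons]
    exact ⟨fun y hy => h y ((PySem.List.mem_sorted _ _ _ _).mp hy),
           PySem.List.sorted_pairwise_rev _ _⟩
  · exact (PySem.List.sorted_perm _ _ _).trans
      (List.Perm.cons x (PySem.List.sorted_perm xs _ _).symm)

theorem sorted_cons_min {x : Int} {xs : List Int} (h : ∀ y ∈ xs, x ≤ y) :
    PySem.List.sorted (x :: xs) (fun v => v) true = PySem.List.sorted xs (fun v => v) true ++ [x] := by
  apply List.Perm.eq_of_pairwise (le := fun a b : Int => b ≤ a)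
  · intro a b _ _ h1 h2; omega
  · exact PySem.List.sorted_pairwise_rev _ _
  · rw [List.pairwise_append]
    refine ⟨PySem.List.sorted_pairwise_rev _ _, List.pairwise_singleton _ _, ?_⟩
    intro a ha b hb
    rw [List.mem_singleton] at hb; subst hb
    exact h a ((PySem.List.mem_sorted _ _ _ _).mp ha)
  · exact (PySem.List.sorted_perm _ _ _).trans
      ((List.Perm.cons x (PySem.List.sorted_perm xs _ _).symm).trans
        (List.perm_append_singleton x _).symm)

theorem topk_cons_max {x : Int} {xs : List Int} (h : ∀ y ∈ xs, y ≤ x) (k : Nat) :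
    pvTopk (k + 1) (x :: xs) = x + pvTopk k xs := by
  rw [pvTopk, sorted_cons_max h, List.take_succ_cons, List.sum_cons, pvTopk]

theorem topk_cons_min {x : Int} {xs : List Int} (h : ∀ y ∈ xs, x ≤ y) {k : Nat}
    (hk : k ≤ xs.length) : pvTopk k (x :: xs) = pvTopk k xs := by
  rw [pvTopk, sorted_cons_min h,
    List.take_append_of_le_length (by rw [PySem.List.length_sorted]; exact hk), pvTopk]

theorem topk_length (xs : List Int) : pvTopk xs.length xs = xs.sum := by
  rw [pvTopk, List.take_of_length_le (by rw [PySem.List.length_sorted])]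
  exact (PySem.List.sorted_perm _ _ _).sum_eq

theorem topk_perm {xs ys : List Int} (h : xs.Perm ys) (k : Nat) : pvTopk k xs = pvTopk k ys := by
  have : PySem.List.sorted xs (fun x => x) true = PySem.List.sorted ys (fun x => x) true := by
    apply List.Perm.eq_of_pairwise (le := fun a b : Int => b ≤ a)
    · intro a b _ _ h1 h2; omega
    · exact PySem.List.sorted_pairwise_rev _ _
    · exact PySem.List.sorted_pairwise_rev _ _
    · exact (PySem.List.sorted_perm _ _ _).trans
        (h.trans (PySem.List.sorted_perm ys _ _).symm)
  rw [pvTopk, this, pvTopk]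

theorem greedy : ∀ (L : List (Int × Int × Int × Int)) (best se so : Int),
    (∀ d ∈ L, d.2.2.1 = d.1 - d.2.1) →
    L.Pairwise (fun a b => |b.2.2.1| ≤ |a.2.2.1|) →
    se + so = L.length → 0 ≤ se → 0 ≤ so →
    (L.foldl aSlotStep (best, se, so)).1 =
      best + (L.map (fun d => d.2.1)).sum + pvTopk so.toNat (L.map (fun d => d.2.2.1)) := by
  have h0 : ∀ k, pvTopk k ([] : List Int) = 0 := by
    intro k; rw [pvTopk, (PySem.List.sorted_eq_nil_iff _ _ _).mpr rfl]; simp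
  intro L
  induction L with
  | nil => intro best se so _ _ _ _ _; simp [h0]
  | cons d t ih =>
    intro best se so hdiff hpw hlen hse hso
    obtain ⟨hd, hpw'⟩ := List.pairwise_cons.mp hpw
    have hδ : d.2.2.1 = d.1 - d.2.1 := hdiff d List.mem_cons_self
    have hdiff' : ∀ b ∈ t, b.2.2.1 = b.1 - b.2.1 := fun b hb => hdiff b (List.mem_cons_of_mem _ hb)
    have hlen' : (se + so : Int) = t.length + 1 := by
      rw [hlen]; simp
    rw [List.foldl_cons]
    by_cases h1 : d.2.2.1 < 0 ∧ 0 < se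
    · have hstep : aSlotStep (best, se, so) d = (best + d.2.1, se - 1, so) := by
        simp only [aSlotStep]; rw [if_pos h1]
      rw [hstep, ih (best + d.2.1) (se - 1) so hdiff' hpw' (by omega) (by omega) hso]
      have hmin : ∀ y ∈ t.map (fun d => d.2.2.1), d.2.2.1 ≤ y := by
        intro y hy
        obtain ⟨b, hb, rfl⟩ := List.mem_map.mp hy
        have := hd b hb
        rcases abs_cases b.2.2.1 with ⟨g1, g2⟩ | ⟨g1, g2⟩ <;>
          rcases abs_cases d.2.2.1 with ⟨f1, f2⟩ | ⟨f1, f2⟩ <;> omega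
      simp only [List.map_cons, List.sum_cons]
      rw [topk_cons_min hmin (by rw [List.length_map]; omega)]; ring
    · by_cases h2 : 0 < d.2.2.1 ∧ 0 < so
      · have hstep : aSlotStep (best, se, so) d = (best + d.1, se, so - 1) := by
          simp only [aSlotStep]; rw [if_neg h1, if_pos h2]
        rw [hstep, ih (best + d.1) se (so - 1) hdiff' hpw' (by omega) hse (by omega)]
        have hmax : ∀ y ∈ t.map (fun d => d.2.2.1), y ≤ d.2.2.1 := by
          intro y hy
          obtain ⟨b, hb, rfl⟩ := List.mem_map.mp hy
          have := hd b hb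
          rcases abs_cases b.2.2.1 with ⟨g1, g2⟩ | ⟨g1, g2⟩ <;>
            rcases abs_cases d.2.2.1 with ⟨f1, f2⟩ | ⟨f1, f2⟩ <;> omega
        simp only [List.map_cons, List.sum_cons]
        rw [show so.toNat = (so - 1).toNat + 1 from by omega, topk_cons_max hmax, hδ]
        ring
      · by_cases h3 : 0 < se
        · have hstep : aSlotStep (best, se, so) d = (best + d.2.1, se - 1, so) := by
            simp only [aSlotStep]; rw [if_neg h1, if_neg h2, if_pos h3]
          rw [hstep, ih (best + d.2.1) (se - 1) so hdiff' hpw' (by omega) (by omega) hso]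
          by_cases hso0 : so ≤ 0
          · have : so = 0 := by omega
            subst this
            simp only [Int.toNat_zero, pvTopk, List.take_zero, List.sum_nil,
              List.map_cons, List.sum_cons]
            ring
          · have hδ0 : d.2.2.1 = 0 := by
              push Not at h1 h2; omega
            have hmin : ∀ y ∈ t.map (fun d => d.2.2.1), d.2.2.1 ≤ y := by
              intro y hy
              obtain ⟨b, hb, rfl⟩ := List.mem_map.mp hy
              have := hd b hb
              rw [hδ0, abs_zero] at this
              rw [hδ0]
              rcases abs_cases b.2.2.1 with ⟨g1, g2⟩ | ⟨g1, g2⟩ <;> omega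
            simp only [List.map_cons, List.sum_cons]
            rw [topk_cons_min hmin (by rw [List.length_map]; omega)]; ring
        · have hstep : aSlotStep (best, se, so) d = (best + d.1, se, so - 1) := by
            simp only [aSlotStep]; rw [if_neg h1, if_neg h2, if_neg h3]
          rw [hstep, ih (best + d.1) se (so - 1) hdiff' hpw' (by omega) hse (by omega)]
          have e1 : pvTopk so.toNat (d.2.2.1 :: t.map (fun d => d.2.2.1)) =
              d.2.2.1 + (t.map (fun d => d.2.2.1)).sum := by
            rw [show so.toNat = (d.2.2.1 :: t.map (fun d => d.2.2.1)).length from by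
              simp [List.length_map]; omega, topk_length, List.sum_cons]
          have e2 : pvTopk (so - 1).toNat (t.map (fun d => d.2.2.1)) =
              (t.map (fun d => d.2.2.1)).sum := by
            rw [show (so - 1).toNat = (t.map (fun d => d.2.2.1)).length from by
              rw [List.length_map]; omega, topk_length]
          simp only [List.map_cons, List.sum_cons]
          rw [e1, e2, hδ]; ring

-- ===== VERDICT (by name: the statement is the Claim_ definition above) =====
theorem solution_spec : Claim_equal_solution := by
  unfold Claim_equal_solution
  intro xs _
  unfold Spec_solution
  have ha := a_fold xs [] []
  have hb := b_fold xs [] 0 0 0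
  simp only [List.nil_append, zero_add] at ha hb
  simp only [solution, solution_alt, ha, hb]
  by_cases hO : xs.filter pvP = []
  · simp [hO, List.map_map, Function.comp_def, pvData]
  · rw [if_neg (by simp [hO]), if_neg (by simp [hO])]
    simp only [List.length_map]
    set O := xs.filter pvP with hOdef
    set E := xs.filter (fun s => !pvP s) with hEdef
    set n : Int := (O.length : Int) with hn
    have hn1 : 1 ≤ n := by
      have := List.length_pos_iff.mpr hO
      omega
    have hfd : PySem.Int.floordiv n 2 = n / 2 := PySem.Int.floordiv_eq_ediv_of_pos (by norm_num)
    have hmd : PySem.Int.mod n 2 = n % 2 := PySem.Int.mod_eq_emod_of_pos (by norm_num)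
    set L := PySem.List.sorted (O.map pvData) (fun o => |o.2.2.1|) true with hL
    have hLlen : L.length = O.length := by
      rw [hL, PySem.List.length_sorted, List.length_map]
    have hdiff : ∀ d ∈ L, d.2.2.1 = d.1 - d.2.1 := by
      intro d hd
      rw [hL, PySem.List.mem_sorted] at hd
      obtain ⟨s, _, rfl⟩ := List.mem_map.mp hd
      simp [pvData]
    rw [greedy L 0 (PySem.Int.floordiv n 2 + PySem.Int.mod n 2) (PySem.Int.floordiv n 2) hdiff
      (PySem.List.sorted_pairwise_rev _ _)
      (by rw [hLlen, hfd, hmd]; omega) (by rw [hfd, hmd]; omega) (by rw [hfd]; omega)]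
    have hperm : L.Perm (O.map pvData) := by
      rw [hL]; exact PySem.List.sorted_perm _ _ _
    have p1 : (L.map (fun d => d.2.1)).sum = (O.map pvE).sum := by
      rw [(hperm.map (fun d => d.2.1)).sum_eq, List.map_map]
      rfl
    have p2 : pvTopk (PySem.Int.floordiv n 2).toNat (L.map (fun d => d.2.2.1))
        = pvTopk (PySem.Int.floordiv n 2).toNat (O.map (fun s => pvO s - pvE s)) := by
      rw [topk_perm (hperm.map (fun d => d.2.2.1)) _, List.map_map]
      rfl
    have p3 : ((E.map pvData).map (fun o => max o.2.1 o.1)).sum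
        = (E.map (fun s => max (pvE s) (pvO s))).sum := by
      rw [List.map_map]; rfl
    rw [p1, p2, p3,
      PySem.List.slice_to _ (show (0 : Int) ≤ PySem.Int.floordiv n 2 from by rw [hfd]; omega)]
    have hB : (List.take (PySem.Int.floordiv n 2).toNat
        (PySem.List.sorted (O.map fun s => pvO s - pvE s) (fun x => x) true)).sum
        = pvTopk (PySem.Int.floordiv n 2).toNat (O.map (fun s => pvO s - pvE s)) := rfl
    rw [hB]
    ring
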